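-- pv_equiv track=rewrite | github.com/namitsinhaSOAR/marketplace | integrations/third_party/team_cymru_scout/core/validator.py | remove_duplicate_ips
-- ===== SOURCE A (Python) =====
-- def remove_duplicate_ips(ip_addresses):
--     """Removes duplicate IP addresses from a list of IP addresses.
--
--     Args:
--         ip_addresses (list): a list of IP addresses
--
--     Returns:
--         tuple: a tuple containing a list of unique IPs and a list of duplicate IPs
--
--     """
--     unique_ips = []
--     duplicates = []
--
--     for ip in ip_addresses:
--         if ip in unique_ips:
--             duplicates.append(ip)
--         else:
--             unique_ips.append(ip)
--
--     return unique_ips, duplicates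
-- ===== SOURCE B (Python) =====
-- def remove_duplicate_ips(ip_addresses):
--     first_index = {}
--     for i, ip in enumerate(ip_addresses):
--         if ip not in first_index:
--             first_index[ip] = i
--     unique = list(first_index)
--     duplicates = [ip for i, ip in enumerate(ip_addresses) if first_index[ip] != i]
--     return unique, duplicates
-- ===== Notes on version B (the rewrite author's own statement) =====
-- stated objective: faster
-- what changed: Replaces A's single interleaved loop that scans the growing unique list on every element with a first-occurrence index dict built once, after which unique is the dict's key order and duplicates is an index-comparison filter over enumerate.
import Mathlib
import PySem

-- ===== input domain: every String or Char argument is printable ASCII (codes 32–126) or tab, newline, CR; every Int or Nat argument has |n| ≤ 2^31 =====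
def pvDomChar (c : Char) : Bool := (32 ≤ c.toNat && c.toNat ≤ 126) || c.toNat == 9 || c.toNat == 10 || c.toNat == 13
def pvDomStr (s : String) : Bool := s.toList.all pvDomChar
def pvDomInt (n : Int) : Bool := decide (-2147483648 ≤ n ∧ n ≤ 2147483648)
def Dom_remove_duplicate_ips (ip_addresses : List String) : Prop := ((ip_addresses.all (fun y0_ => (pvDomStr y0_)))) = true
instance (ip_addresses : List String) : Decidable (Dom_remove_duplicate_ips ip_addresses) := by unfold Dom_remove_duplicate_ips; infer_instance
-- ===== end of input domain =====

-- B replaces A's quadratic membership-scan loop with a first-occurrence index dict plus an index-comparison filter (faster).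


-- ===== PORT A =====
-- loop body: if ip in unique_ips: duplicates.append(ip) else: unique_ips.append(ip)
def pvAStep (s : List String × List String) (ip : String) : List String × List String :=
  if s.1.contains ip then (s.1, s.2 ++ [ip]) else (s.1 ++ [ip], s.2)

def remove_duplicate_ips (ip_addresses : List String) : List String × List String :=
  ip_addresses.foldl pvAStep ([], [])

-- ===== PORT B =====
-- first-pass loop body: if ip not in first_index: first_index[ip] = i
def pvDStep (d : PySem.Dict String Int) (p : Int × String) : PySem.Dict String Int :=
  if d.contains p.2 then d else d.insert p.2 p.1

-- Python's `first_index[ip]` never misses here (every scanned ip is a key); ported as getD with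
-- unreachable default -1, exact on all inputs of this program.
def remove_duplicate_ips_alt (ip_addresses : List String) : List String × List String :=
  let first_index := (PySem.List.enumerate ip_addresses).foldl pvDStep PySem.Dict.empty
  let unique := first_index.keys
  let duplicates := ((PySem.List.enumerate ip_addresses).filter
      (fun p => first_index.getD p.2 (-1) != p.1)).map (·.2)
  (unique, duplicates)

-- ===== PRECONDITION & SPEC =====
def Spec_remove_duplicate_ips (ip_addresses : List String) (out : List String × List String) : Prop := out = remove_duplicate_ips_alt ip_addresses
instance (ip_addresses : List String) (out : List String × List String) : Decidable (Spec_remove_duplicate_ips ip_addresses out) := by unfold Spec_remove_duplicate_ips; infer_instance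

-- ===== CLAIM (what is proved, stated in full; the proofs are below) =====
def Claim_equal_remove_duplicate_ips : Prop := ∀ (ip_addresses : List String), Dom_remove_duplicate_ips ip_addresses → Spec_remove_duplicate_ips ip_addresses (remove_duplicate_ips ip_addresses)

-- ===== LEMMAS AND PROOFS =====
def pvD (xs : List String) : PySem.Dict String Int :=
  (PySem.List.enumerate xs).foldl pvDStep PySem.Dict.empty

def pvA (xs : List String) : List String × List String :=
  xs.foldl pvAStep ([], [])

lemma pvD_append (xs : List String) (x : String) :
    pvD (xs ++ [x]) = pvDStep (pvD xs) ((xs.length : Int), x) := by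
  simp [pvD, PySem.List.enumerate_append, List.foldl_append, PySem.List.enumerate]

lemma pvA_append (xs : List String) (x : String) :
    pvA (xs ++ [x]) = pvAStep (pvA xs) x := by
  simp [pvA, List.foldl_append]

lemma pvMain (xs : List String) :
    (pvD xs).keys = (pvA xs).1
    ∧ (∀ ip, ip ∈ (pvD xs).keys ↔ ip ∈ xs)
    ∧ (∀ ip v, (pvD xs).get? ip = some v → 0 ≤ v ∧ v < (xs.length : Int))
    ∧ ((PySem.List.enumerate xs).filter (fun p => (pvD xs).getD p.2 (-1) != p.1)).map (·.2)
        = (pvA xs).2 := by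
  induction xs using List.reverseRecOn with
  | nil => simp [pvD, pvA, PySem.List.enumerate, PySem.Dict.keys_empty]
  | append_singleton xs x ih =>
    obtain ⟨hk, hm, hb, hf⟩ := ih
    have hsnd : ∀ p ∈ PySem.List.enumerate xs (0:Int), p.2 ∈ xs := by
      intro p hp
      obtain ⟨k, hklt, rfl⟩ := (PySem.List.mem_enumerate_iff _ _ _).1 hp
      exact List.getElem_mem hklt
    have henum : PySem.List.enumerate (xs ++ [x]) (0:Int)
        = PySem.List.enumerate xs 0 ++ [((xs.length : Int), x)] := by
      simp [PySem.List.enumerate_append, PySem.List.enumerate]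
    by_cases hc : (pvD xs).contains x = true
    · -- x already seen
      have hxmem : x ∈ xs := (hm x).1 ((PySem.Dict.contains_iff_mem_keys _ _).1 hc)
      have hD : pvD (xs ++ [x]) = pvD xs := by
        rw [pvD_append]; simp [pvDStep, hc]
      have hA1 : (pvA xs).1.contains x = true := by
        rw [List.contains_eq_mem, decide_eq_true_eq, ← hk]
        exact (hm x).2 hxmem
      have hA : pvA (xs ++ [x]) = ((pvA xs).1, (pvA xs).2 ++ [x]) := by
        rw [pvA_append]; simp only [pvAStep, hA1]; simp
      obtain ⟨v, hv⟩ : ∃ v, (pvD xs).get? x = some v := by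
        have := PySem.Dict.contains_eq_isSome_get? (d := pvD xs) (k := x)
        rw [hc] at this
        exact Option.isSome_iff_exists.mp this.symm
      have hvb := hb x v hv
      refine ⟨?_, ?_, ?_, ?_⟩
      · rw [hD, hA, hk]
      · intro ip; rw [hD]
        constructor
        · intro h; exact List.mem_append_left _ ((hm ip).1 h)
        · intro h
          rcases List.mem_append.mp h with h | h
          · exact (hm ip).2 h
          · simp at h; subst h; exact (hm ip).2 hxmem
      · intro ip v' hv'
        rw [hD] at hv'
        have := hb ip v' hv'
        simp only [List.length_append, List.length_singleton]
        push_cast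
        omega
      · rw [hD, hA, henum, List.filter_append, List.map_append, hf]
        have hlast : ((pvD xs).getD x (-1) != (xs.length : Int)) = true := by
          rw [PySem.Dict.getD_of_get?_eq_some _ _ hv]
          simp; omega
        simp [hlast]
    · -- x fresh
      have hxnot : x ∉ xs := fun h => hc ((PySem.Dict.contains_iff_mem_keys _ _).2 ((hm x).2 h))
      have hcf : (pvD xs).contains x = false := by simpa using hc
      have hD : pvD (xs ++ [x]) = (pvD xs).insert x (xs.length : Int) := by
        rw [pvD_append]; simp [pvDStep, hcf]
      have hA1 : (pvA xs).1.contains x = false := by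
        rw [List.contains_eq_mem, decide_eq_false_iff_not, ← hk]
        exact fun h => hxnot ((hm x).1 h)
      have hA : pvA (xs ++ [x]) = ((pvA xs).1 ++ [x], (pvA xs).2) := by
        rw [pvA_append]; simp only [pvAStep, hA1]; simp
      refine ⟨?_, ?_, ?_, ?_⟩
      · rw [hD, hA, PySem.Dict.keys_insert_of_not_contains _ _ hcf, hk]
      · intro ip; rw [hD, PySem.Dict.mem_keys_insert]
        rw [List.mem_append]
        constructor
        · rintro (rfl | h)
          · simp
          · exact Or.inl ((hm ip).1 h)
        · rintro (h | h)
          · exact Or.inr ((hm ip).2 h)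
          · simp at h; subst h; exact Or.inl rfl
      · intro ip v' hv'
        rw [hD, PySem.Dict.get?_insert] at hv'
        simp only [List.length_append, List.length_singleton]
        split_ifs at hv' with hip
        · cases hv'; omega
        · have := hb ip v' hv'
          omega
      · rw [hD, hA, henum, List.filter_append, List.map_append]
        have hpre : (PySem.List.enumerate xs (0:Int)).filter
            (fun p => ((pvD xs).insert x (xs.length : Int)).getD p.2 (-1) != p.1)
            = (PySem.List.enumerate xs 0).filter (fun p => (pvD xs).getD p.2 (-1) != p.1) := by
          apply List.filter_congr
          intro p hp
          have : p.2 ≠ x := fun h => hxnot (h ▸ hsnd p hp)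
          rw [PySem.Dict.getD_insert_of_ne _ _ _ this]
        rw [hpre, hf]
        simp

-- ===== VERDICT (by name: the statement is the Claim_ definition above) =====
theorem remove_duplicate_ips_spec : Claim_equal_remove_duplicate_ips := by
  intro xs _
  obtain ⟨hk, _, _, hf⟩ := pvMain xs
  show remove_duplicate_ips xs = remove_duplicate_ips_alt xs
  have hB : remove_duplicate_ips_alt xs
      = ((pvD xs).keys, ((PySem.List.enumerate xs).filter
          (fun p => (pvD xs).getD p.2 (-1) != p.1)).map (·.2)) := rfl
  rw [hB, hk, hf]
  rfl
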